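-- pv_equiv track=rewrite | github.com/martinthebrain/dbus-shelly-evcharger | venus_evcharger/bootstrap/wizard.py | _existing_source_ids_from_assignments
-- ===== SOURCE A (Python) =====
-- def _existing_source_ids_from_assignments(assignments: dict[str, str]) -> tuple[str, ...]:
--     source_ids = list(
--         item.strip()
--         for item in assignments.get("AutoEnergySources", "").split(",")
--         if item.strip()
--     )
--     for key in assignments:
--         if not key.startswith("AutoEnergySource."):
--             continue
--         source_id = key[len("AutoEnergySource.") :].split(".", 1)[0].strip()
--         if source_id and source_id not in source_ids:
--             source_ids.append(source_id)
--     return tuple(source_ids)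
-- ===== SOURCE B (Python) =====
-- def _existing_source_ids_from_assignments(assignments: dict[str, str]) -> tuple[str, ...]:
--     prefix = "AutoEnergySource."
--     base = [
--         item.strip()
--         for item in assignments.get("AutoEnergySources", "").split(",")
--         if item.strip()
--     ]
--     key_ids = [
--         key[len(prefix):].split(".", 1)[0].strip()
--         for key in assignments
--         if key.startswith(prefix)
--     ]
--     return tuple(base) + tuple(
--         sid
--         for i, sid in enumerate(key_ids)
--         if sid and sid not in base and key_ids.index(sid) == i
--     )
-- ===== Notes on version B (the rewrite author's own statement) =====
-- stated objective: alternative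
-- what changed: A interleaves extraction and dedup in one loop that grows source_ids and tests membership against the growing accumulator; B keeps no dedup state at all: it materialises the full key-id list first and keeps an occurrence iff it is positional-first (key_ids.index(sid) == i), filtering against the fixed base list.
import Mathlib
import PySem

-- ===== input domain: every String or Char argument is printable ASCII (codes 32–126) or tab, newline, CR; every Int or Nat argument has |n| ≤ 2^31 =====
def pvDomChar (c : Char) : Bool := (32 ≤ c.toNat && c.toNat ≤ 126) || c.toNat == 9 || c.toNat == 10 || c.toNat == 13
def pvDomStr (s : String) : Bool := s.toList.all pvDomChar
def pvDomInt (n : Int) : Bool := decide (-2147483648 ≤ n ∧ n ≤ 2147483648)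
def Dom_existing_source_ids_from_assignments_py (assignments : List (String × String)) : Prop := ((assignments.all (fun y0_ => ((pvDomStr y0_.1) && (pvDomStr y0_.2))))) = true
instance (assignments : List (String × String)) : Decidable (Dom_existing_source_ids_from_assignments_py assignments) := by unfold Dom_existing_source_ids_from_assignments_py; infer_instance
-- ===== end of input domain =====

-- B keeps no dedup state: it materialises the key-id list and keeps an occurrence iff it is positional-first (list.index == its own index), instead of A's loop growing source_ids and testing membership against the growing accumulator; same result, different algorithm.

-- shared helpers (both Pythons contain these identical expressions)
-- assignments.get("AutoEnergySources", "").split(",") with items stripped and empties dropped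
def pvStringIds (assignments : List (String × String)) : List String :=
  (((PySem.Str.split? ((PySem.Dict.mk assignments).getD "AutoEnergySources" "") ",").getD []).map PySem.Str.strip).filter (fun i => i ≠ "")

-- key[len("AutoEnergySource."):].split(".", 1)[0].strip()   ([0] of a split result is its head; split with nonempty sep is never empty)
def pvKeyId (key : String) : String :=
  PySem.Str.strip ((((PySem.Str.splitMax? (PySem.Str.slice key (some 17) none) "." 1).getD []).headD ""))

-- ===== PORT A =====
def existing_source_ids_from_assignments_py (assignments : List (String × String)) : List String :=
  let source_ids := pvStringIds assignments
  assignments.foldl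
    (fun acc kv =>
      if !(PySem.Str.startswith kv.1 "AutoEnergySource.") then acc
      else
        let source_id := pvKeyId kv.1
        if source_id ≠ "" ∧ source_id ∉ acc then acc ++ [source_id] else acc)
    source_ids

-- ===== PORT B =====
def existing_source_ids_from_assignments_py_alt (assignments : List (String × String)) : List String :=
  let base := pvStringIds assignments
  let key_ids :=
    (assignments.filter (fun kv => PySem.Str.startswith kv.1 "AutoEnergySource.")).map
      (fun kv => pvKeyId kv.1)
  base ++
    ((PySem.List.enumerate key_ids 0).filter
        (fun p => decide (p.2 ≠ "") && decide (p.2 ∉ base) &&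
          ((PySem.List.index? key_ids p.2).map (fun n => (n : Int)) == some p.1))).map (·.2)

-- ===== PRECONDITION & SPEC =====
def Spec_existing_source_ids_from_assignments_py (assignments : List (String × String)) (out : List String) : Prop := out = existing_source_ids_from_assignments_py_alt assignments
instance (assignments : List (String × String)) (out : List String) : Decidable (Spec_existing_source_ids_from_assignments_py assignments out) := by unfold Spec_existing_source_ids_from_assignments_py; infer_instance

-- ===== CLAIM (what is proved, stated in full; the proofs are below) =====
def Claim_equal_existing_source_ids_from_assignments_py : Prop := ∀ (assignments : List (String × String)), Dom_existing_source_ids_from_assignments_py assignments → Spec_existing_source_ids_from_assignments_py assignments (existing_source_ids_from_assignments_py assignments)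

-- ===== LEMMAS AND PROOFS =====

-- A's step over one extracted key id
def pvStep (acc : List String) (sid : String) : List String :=
  if sid ≠ "" ∧ sid ∉ acc then acc ++ [sid] else acc

-- canonical "first occurrence, nonempty, not yet seen" selection
def pvFirstOcc : List String → List String → List String
  | [], _ => []
  | x :: xs, seen => if x ≠ "" ∧ x ∉ seen then x :: pvFirstOcc xs (seen ++ [x]) else pvFirstOcc xs seen

lemma pvFirstOcc_cons (x : String) (xs seen : List String) :
    pvFirstOcc (x :: xs) seen = if x ≠ "" ∧ x ∉ seen then x :: pvFirstOcc xs (seen ++ [x]) else pvFirstOcc xs seen := rfl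

-- pvFirstOcc only depends on the seen-list's membership at nonempty strings
lemma pvFirstOcc_congr (xs : List String) (s1 s2 : List String)
    (h : ∀ y : String, y ≠ "" → (y ∈ s1 ↔ y ∈ s2)) : pvFirstOcc xs s1 = pvFirstOcc xs s2 := by
  induction xs generalizing s1 s2 with
  | nil => rfl
  | cons x xs ih =>
      unfold pvFirstOcc
      by_cases hx : x = ""
      · simp only [hx, ne_eq, not_true_eq_false, false_and, if_false]
        exact ih s1 s2 h
      · have hmem := h x hx
        by_cases hc : x ∈ s1
        · rw [if_neg (by tauto), if_neg (by tauto)]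
          exact ih s1 s2 h
        · rw [if_pos ⟨hx, hc⟩, if_pos ⟨hx, by tauto⟩]
          congr 1
          apply ih
          intro y hy
          simp only [List.mem_append, List.mem_singleton]
          rw [h y hy]

-- A's fold of pvStep appends exactly the canonical selection
lemma pv_fold_step (xs init : List String) :
    xs.foldl pvStep init = init ++ pvFirstOcc xs init := by
  induction xs generalizing init with
  | nil => simp [pvFirstOcc]
  | cons x xs ih =>
      rw [List.foldl_cons]
      unfold pvFirstOcc
      by_cases hc : x ≠ "" ∧ x ∉ init
      · rw [show pvStep init x = init ++ [x] from if_pos hc, if_pos hc, ih]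
        simp
      · rw [show pvStep init x = init from if_neg hc, if_neg hc, ih]

-- A's fold over the key/value pairs is the fold of pvStep over the extracted key ids
lemma pv_fold_extract (l : List (String × String)) (init : List String) :
    l.foldl
      (fun acc kv =>
        if !(PySem.Str.startswith kv.1 "AutoEnergySource.") then acc
        else
          let source_id := pvKeyId kv.1
          if source_id ≠ "" ∧ source_id ∉ acc then acc ++ [source_id] else acc)
      init
    = ((l.filter (fun kv => PySem.Str.startswith kv.1 "AutoEnergySource.")).map (fun kv => pvKeyId kv.1)).foldl pvStep init := by
  induction l generalizing init with
  | nil => rfl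
  | cons kv l ih =>
      simp only [List.foldl_cons, List.filter_cons]
      cases h : PySem.Str.startswith kv.1 "AutoEnergySource." with
      | false => simp only [Bool.not_false, if_pos]; rw [ih]; simp
      | true =>
          simp only [Bool.not_true, Bool.false_eq_true, if_false, if_pos, List.map_cons, List.foldl_cons]
          rw [ih]
          rfl

-- index of x in pre ++ x :: xs is pre.length when x is not in pre
lemma pv_index_fresh (pre xs : List String) (x : String) (h : x ∉ pre) :
    PySem.List.index? (pre ++ x :: xs) x = some pre.length := by
  induction pre with
  | nil => exact PySem.List.index?_cons_self x (xs)
  | cons p pre ih =>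
      have hp : p ≠ x := fun e => h (by simp [e])
      rw [List.cons_append, PySem.List.index?_cons_of_ne _ hp,
          ih (fun hm => h (List.mem_cons_of_mem _ hm))]
      rfl

-- index of x in pre ++ rest is below pre.length when x ∈ pre
lemma pv_index_stale (pre rest : List String) (x : String) (h : x ∈ pre) :
    ∃ j : Nat, PySem.List.index? (pre ++ rest) x = some j ∧ j < pre.length := by
  rw [PySem.List.index?_append_of_mem rest h]
  have hs : (PySem.List.index? pre x).isSome := (PySem.List.index?_isSome_iff pre x).mpr h
  obtain ⟨j, hj⟩ := Option.isSome_iff_exists.mp hs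
  obtain ⟨p, s, hps, hl, -⟩ := (PySem.List.index?_eq_some_iff pre x j).mp hj
  exact ⟨j, hj, by rw [← hl, hps]; simp⟩

-- B's enumerate/index? filter computes the canonical selection (pre = already-scanned prefix of the key-id list)
lemma pv_enum_firstOcc (base : List String) (xs : List String) (pre : List String) :
    ((PySem.List.enumerate xs (pre.length : Int)).filter
        (fun p => decide (p.2 ≠ "") && decide (p.2 ∉ base) &&
          ((PySem.List.index? (pre ++ xs) p.2).map (fun n => (n : Int)) == some p.1))).map (·.2)
    = pvFirstOcc xs (base ++ pre) := by
  induction xs generalizing pre with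
  | nil => simp [PySem.List.enumerate_nil, pvFirstOcc]
  | cons x xs ih =>
      rw [PySem.List.enumerate_cons, List.filter_cons]
      have hstep : ((pre.length : Int) + 1) = (((pre ++ [x]).length : Int)) := by simp
      have happ : pre ++ x :: xs = (pre ++ [x]) ++ xs := by simp
      have htail :
          ((PySem.List.enumerate xs ((pre.length : Int) + 1)).filter
              (fun p => decide (p.2 ≠ "") && decide (p.2 ∉ base) &&
                ((PySem.List.index? (pre ++ x :: xs) p.2).map (fun n => (n : Int)) == some p.1))).map (·.2)
          = pvFirstOcc xs (base ++ (pre ++ [x])) := by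
        rw [hstep, happ]
        exact ih (pre ++ [x])
      by_cases hx : x ∈ pre
      · -- head rejected: its first occurrence is earlier, in pre
        obtain ⟨j, hj, hjlt⟩ := pv_index_stale pre (x :: xs) x hx
        have hne : ((PySem.List.index? (pre ++ x :: xs) x).map (fun n => (n : Int)) == some ((pre.length : Int))) = false := by
          rw [hj]
          have hne' : ((j : Int)) ≠ ((pre.length : Int)) := by exact_mod_cast Nat.ne_of_lt hjlt
          simp [hne']
        rw [show (decide (x ≠ "") && decide (x ∉ base) &&
              ((PySem.List.index? (pre ++ x :: xs) x).map (fun n => (n : Int)) == some ((pre.length : Int)))) = false by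
            rw [hne]; simp]
        simp only [Bool.false_eq_true, if_false]
        rw [htail]
        have hcongr : pvFirstOcc xs (base ++ (pre ++ [x])) = pvFirstOcc xs (base ++ pre) := by
          apply pvFirstOcc_congr
          intro y _
          simp only [List.mem_append, List.mem_singleton]
          constructor
          · rintro (h | h | rfl) <;> [exact Or.inl h; exact Or.inr h; exact Or.inr hx]
          · rintro (h | h) <;> [exact Or.inl h; exact Or.inr (Or.inl h)]
        rw [hcongr, pvFirstOcc_cons]
        rw [if_neg (by rintro ⟨-, hmem⟩; exact hmem (by simp [hx]))]
      · -- head's first occurrence is here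
        have hidx : ((PySem.List.index? (pre ++ x :: xs) x).map (fun n => (n : Int)) == some ((pre.length : Int))) = true := by
          rw [pv_index_fresh pre xs x hx]; simp
        by_cases hk : x ≠ "" ∧ x ∉ base
        · rw [show (decide (x ≠ "") && decide (x ∉ base) &&
                ((PySem.List.index? (pre ++ x :: xs) x).map (fun n => (n : Int)) == some ((pre.length : Int)))) = true by
              rw [hidx]; simp [hk.1, hk.2]]
          simp only [if_pos, List.map_cons]
          rw [htail, pvFirstOcc_cons]
          rw [if_pos ⟨hk.1, by simp only [List.mem_append]; rintro (h | h); exacts [hk.2 h, hx h]⟩]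
          rw [List.append_assoc]
        · rw [show (decide (x ≠ "") && decide (x ∉ base) &&
                ((PySem.List.index? (pre ++ x :: xs) x).map (fun n => (n : Int)) == some ((pre.length : Int)))) = false by
              rcases not_and_or.mp hk with h | h
              · simp [show x = "" from not_not.mp h]
              · simp [not_not.mp h]]
          simp only [Bool.false_eq_true, if_false]
          rw [htail]
          have hcongr : pvFirstOcc xs (base ++ (pre ++ [x])) = pvFirstOcc xs (base ++ pre) := by
            apply pvFirstOcc_congr
            intro y hy
            simp only [List.mem_append, List.mem_singleton]
            rcases not_and_or.mp hk with h | h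
            · have hxe : x = "" := not_not.mp h
              constructor
              · rintro (h1 | h1 | rfl) <;> [exact Or.inl h1; exact Or.inr h1; exact absurd hxe hy]
              · rintro (h1 | h1) <;> [exact Or.inl h1; exact Or.inr (Or.inl h1)]
            · have hxb : x ∈ base := not_not.mp h
              constructor
              · rintro (h1 | h1 | rfl) <;> [exact Or.inl h1; exact Or.inr h1; exact Or.inl hxb]
              · rintro (h1 | h1) <;> [exact Or.inl h1; exact Or.inr (Or.inl h1)]
          rw [hcongr, pvFirstOcc_cons]
          rw [if_neg (by
            rintro ⟨h1, h2⟩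
            rcases not_and_or.mp hk with h | h
            · exact h1 (not_not.mp h)
            · exact h2 (by simp [not_not.mp h]))]

-- ===== VERDICT (by name: the statement is the Claim_ definition above) =====
theorem existing_source_ids_from_assignments_py_spec : Claim_equal_existing_source_ids_from_assignments_py := by
  intro assignments _
  show _ = _
  have hA : existing_source_ids_from_assignments_py assignments
      = pvStringIds assignments ++ pvFirstOcc
          ((assignments.filter (fun kv => PySem.Str.startswith kv.1 "AutoEnergySource.")).map (fun kv => pvKeyId kv.1))
          (pvStringIds assignments) := by
    unfold existing_source_ids_from_assignments_py
    rw [pv_fold_extract, pv_fold_step]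
  have hB : existing_source_ids_from_assignments_py_alt assignments
      = pvStringIds assignments ++ pvFirstOcc
          ((assignments.filter (fun kv => PySem.Str.startswith kv.1 "AutoEnergySource.")).map (fun kv => pvKeyId kv.1))
          (pvStringIds assignments) := by
    have h := pv_enum_firstOcc (pvStringIds assignments)
      ((assignments.filter (fun kv => PySem.Str.startswith kv.1 "AutoEnergySource.")).map (fun kv => pvKeyId kv.1)) []
    simp only [List.length_nil, Nat.cast_zero, List.nil_append, List.append_nil] at h
    exact congrArg (fun l => pvStringIds assignments ++ l) h
  rw [hA, hB]
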